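-- pv_equiv track=rewrite | github.com/GoogleCloudPlatform/ml-on-gcp | sklearn/hpsearch/gke_parallel.py | _partition_grid
-- ===== SOURCE A (Python) =====
-- from copy import deepcopy
-- from itertools import product
--
-- def _partition_grid(param_grid_dict, partition_keys):
--     _param_grid_dict = deepcopy(param_grid_dict)
--
--     partition_lists = [_param_grid_dict.pop(key) for key in partition_keys]
--
--     partitioned = []
--     for prod in product(*partition_lists):
--         lists = [[element] for element in prod]
--         singleton = dict(zip(partition_keys, lists))
--         singleton.update(_param_grid_dict)
--
--         partitioned.append(singleton)
--
--     return partitioned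
-- ===== SOURCE B (Python) =====
-- from copy import deepcopy
--
-- def _partition_grid(param_grid_dict, partition_keys):
--     rest = deepcopy(param_grid_dict)
--     pulled = [(key, rest.pop(key)) for key in partition_keys]
--
--     partitioned = [{}]
--     for key, values in pulled:
--         partitioned = [{**p, key: [v]} for p in partitioned for v in values]
--
--     for p in partitioned:
--         p.update(rest)
--
--     return partitioned
-- ===== Notes on version B (the rewrite author's own statement) =====
-- stated objective: alternative
-- what changed: Replaces itertools.product plus per-tuple dict(zip(...)) construction with an incremental left fold that rebuilds the list of partial dicts for each partition key (rightmost key varying fastest), then updates each accumulated dict with the remaining grid.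
import Mathlib
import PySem

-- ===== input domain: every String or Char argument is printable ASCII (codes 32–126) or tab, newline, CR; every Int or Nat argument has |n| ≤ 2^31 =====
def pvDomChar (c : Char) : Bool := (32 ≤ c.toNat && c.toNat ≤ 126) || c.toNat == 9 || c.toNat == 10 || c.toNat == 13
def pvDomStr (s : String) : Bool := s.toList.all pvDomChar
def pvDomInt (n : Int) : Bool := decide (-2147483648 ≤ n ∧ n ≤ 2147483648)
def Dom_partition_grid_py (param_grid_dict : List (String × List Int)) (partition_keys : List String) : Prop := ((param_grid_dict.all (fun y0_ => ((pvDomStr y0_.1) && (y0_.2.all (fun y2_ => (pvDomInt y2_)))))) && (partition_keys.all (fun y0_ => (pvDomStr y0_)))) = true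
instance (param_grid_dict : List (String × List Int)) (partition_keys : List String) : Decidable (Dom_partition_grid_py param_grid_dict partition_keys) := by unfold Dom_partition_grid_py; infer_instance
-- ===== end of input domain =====

-- B replaces itertools.product + dict(zip(...)) with an incremental fold over the partition
-- keys (objective: alternative decomposition, same cost); return values proved equal on Pre_.

-- d[k] = {**d, k: v} / overwrite-in-place-else-append: shared dict-insert primitive both Pythons use
def pyDictInsert (d : List (String × List Int)) (k : String) (v : List Int) : List (String × List Int) :=
  if d.any (fun p => p.1 == k) then d.map (fun p => if p.1 == k then (k, v) else p)
  else d ++ [(k, v)]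

-- ===== PORT A =====
-- '[_param_grid_dict.pop(key) for key in partition_keys]' : the popped values, then the remaining dict
-- (Python's pop raises KeyError on a missing key: those inputs are outside Pre_; here the default [] is used)
def pgPopsA : List (String × List Int) → List String → (List (List Int)) × List (String × List Int)
  | rest, [] => ([], rest)
  | rest, k :: ks =>
    let v := match rest.find? (fun p => p.1 == k) with | some p => p.2 | none => []
    let out := pgPopsA (rest.eraseP (fun p => p.1 == k)) ks
    (v :: out.1, out.2)

-- itertools.product(*lists) (leftmost factor varies slowest, as in Python)
def pyProduct : List (List Int) → List (List Int)
  | [] => [[]]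
  | l :: ls => l.flatMap (fun x => (pyProduct ls).map (fun t => x :: t))

def partition_grid_py (param_grid_dict : List (String × List Int)) (partition_keys : List String) : List (List (String × List Int)) :=
  let popped := pgPopsA param_grid_dict partition_keys
  (pyProduct popped.1).map (fun prod =>
    let lists := prod.map (fun element => [element])
    let singleton := (partition_keys.zip lists).foldl (fun d p => pyDictInsert d p.1 p.2) []
    popped.2.foldl (fun d p => pyDictInsert d p.1 p.2) singleton)

-- ===== PORT B =====
-- '[(key, rest.pop(key)) for key in partition_keys]' : (key, values) pairs, then the remaining dict
def pgPulledB : List (String × List Int) → List String → (List (String × List Int)) × List (String × List Int)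
  | rest, [] => ([], rest)
  | rest, k :: ks =>
    let v := match rest.find? (fun p => p.1 == k) with | some p => p.2 | none => []
    let out := pgPulledB (rest.eraseP (fun p => p.1 == k)) ks
    ((k, v) :: out.1, out.2)

def partition_grid_py_alt (param_grid_dict : List (String × List Int)) (partition_keys : List String) : List (List (String × List Int)) :=
  let pulled := pgPulledB param_grid_dict partition_keys
  let partitioned := pulled.1.foldl
    (fun partitioned kv => partitioned.flatMap (fun p => kv.2.map (fun v => pyDictInsert p kv.1 [v])))
    [([] : List (String × List Int))]
  partitioned.map (fun p => pulled.2.foldl (fun d q => pyDictInsert d q.1 q.2) p)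

-- ===== PRECONDITION & SPEC =====
-- Pre_ excludes exactly the inputs where Python A raises KeyError (a repeated partition key,
-- or a partition key absent from the grid); Python B raises there too.
def Pre_partition_grid_py (param_grid_dict : List (String × List Int)) (partition_keys : List String) : Prop :=
  partition_keys.Nodup ∧ ∀ k ∈ partition_keys, k ∈ param_grid_dict.map Prod.fst
instance (param_grid_dict : List (String × List Int)) (partition_keys : List String) : Decidable (Pre_partition_grid_py param_grid_dict partition_keys) := by unfold Pre_partition_grid_py; infer_instance

def pvWitness_partition_grid_py : (List (String × List Int)) × List String :=
  ([("a", [1, 2]), ("b", [3, 4]), ("c", [7])], ["a", "b"])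

def Spec_partition_grid_py (param_grid_dict : List (String × List Int)) (partition_keys : List String) (out : List (List (String × List Int))) : Prop := out = partition_grid_py_alt param_grid_dict partition_keys
instance (param_grid_dict : List (String × List Int)) (partition_keys : List String) (out : List (List (String × List Int))) : Decidable (Spec_partition_grid_py param_grid_dict partition_keys out) := by unfold Spec_partition_grid_py; infer_instance

-- ===== CLAIM (what is proved, stated in full; the proofs are below) =====
def Claim_equal_partition_grid_py : Prop := ∀ (param_grid_dict : List (String × List Int)) (partition_keys : List String), Dom_partition_grid_py param_grid_dict partition_keys → Pre_partition_grid_py param_grid_dict partition_keys → Spec_partition_grid_py param_grid_dict partition_keys (partition_grid_py param_grid_dict partition_keys)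

-- ===== LEMMAS AND PROOFS =====

-- A's pops and B's pops walk the same dict: values, keys and remainder agree
theorem pgPulledB_fst_map_snd (d : List (String × List Int)) (ks : List String) :
    (pgPulledB d ks).1.map Prod.snd = (pgPopsA d ks).1 := by
  induction ks generalizing d with
  | nil => rfl
  | cons k ks ih => simp [pgPulledB, pgPopsA, ih]

theorem pgPulledB_fst_map_fst (d : List (String × List Int)) (ks : List String) :
    (pgPulledB d ks).1.map Prod.fst = ks := by
  induction ks generalizing d with
  | nil => rfl
  | cons k ks ih => simp [pgPulledB, ih]

theorem pgPulledB_snd (d : List (String × List Int)) (ks : List String) :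
    (pgPulledB d ks).2 = (pgPopsA d ks).2 := by
  induction ks generalizing d with
  | nil => rfl
  | cons k ks ih => simp [pgPulledB, pgPopsA, ih]

-- the fold step of B distributes over the accumulator list
theorem foldl_step_flatMap (tl : List (String × List Int)) (acc : List (List (String × List Int))) :
    tl.foldl (fun partitioned kv => partitioned.flatMap (fun p => kv.2.map (fun v => pyDictInsert p kv.1 [v]))) acc
      = acc.flatMap (fun p =>
          tl.foldl (fun partitioned kv => partitioned.flatMap (fun p => kv.2.map (fun v => pyDictInsert p kv.1 [v]))) [p]) := by
  induction tl generalizing acc with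
  | nil => simp
  | cons kv tl ih =>
    simp only [List.foldl_cons]
    rw [ih, List.flatMap_assoc]
    refine List.flatMap_congr ?_
    intro p hp
    simp only [List.flatMap_cons, List.flatMap_nil, List.append_nil]
    exact (ih _).symm

-- B's incremental fold equals A's map over the cartesian product, for any start dict p0
theorem fold_eq_product (pulled : List (String × List Int)) (p0 : List (String × List Int)) :
    pulled.foldl (fun partitioned kv => partitioned.flatMap (fun p => kv.2.map (fun v => pyDictInsert p kv.1 [v]))) [p0]
      = (pyProduct (pulled.map Prod.snd)).map (fun prod =>
          ((pulled.map Prod.fst).zip (prod.map (fun element => [element]))).foldl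
            (fun d p => pyDictInsert d p.1 p.2) p0) := by
  induction pulled generalizing p0 with
  | nil => simp [pyProduct]
  | cons kv tl ih =>
    simp only [List.map_cons, pyProduct, List.foldl_cons]
    rw [foldl_step_flatMap]
    simp only [List.flatMap_cons, List.flatMap_nil, List.append_nil, List.flatMap_map,
      List.map_flatMap, List.map_map]
    refine List.flatMap_congr ?_
    intro v hv
    rw [ih (pyDictInsert p0 kv.1 [v])]
    simp [Function.comp]

theorem partition_grid_py_eq (d : List (String × List Int)) (ks : List String) :
    partition_grid_py d ks = partition_grid_py_alt d ks := by
  unfold partition_grid_py partition_grid_py_alt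
  dsimp only
  rw [fold_eq_product, pgPulledB_fst_map_snd, pgPulledB_fst_map_fst, pgPulledB_snd]
  rw [List.map_map]
  rfl

-- ===== VERDICT (by name: the statement is the Claim_ definition above) =====
theorem partition_grid_py_spec : Claim_equal_partition_grid_py := by
  intro d ks _ _
  exact (partition_grid_py_eq d ks).symm ▸ rfl
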